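-- pv_equiv track=rewrite | github.com/artie2000/nanoGPT | data_gen/data_gen.py | GenSumText
-- ===== SOURCE A (Python) =====
-- def GenSumText(sum_var, summand_vars, values, avail_vars):
--     l = len(summand_vars)
--     clauses = []
--
--     if l == 0:
--         final_val = 0
--         clauses.append(sum_var + " = 0")
--     elif l == 1:
--         final_val = values[0]
--         clauses.append(sum_var + " = " + summand_vars[0] + " = " + str(final_val))
--     else:
--         temp_var = (avail_vars.pop() if l > 2 else sum_var)
--         temp_val = (values[0] + values[1]) % 23
--         clauses.append(temp_var + " = " + summand_vars[0] + " + " + summand_vars[1] + " = " + str(values[0]) + " + " + str(values[1]) + " = " + str(temp_val))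
--
--         for i in range(2,l):
--             old_temp_var = temp_var
--             old_temp_val = temp_val
--             temp_var = (avail_vars.pop() if i < l-1  else sum_var)
--             temp_val = (temp_val + values[i]) % 23
--             clauses.append(temp_var + " = " + old_temp_var + " + " + summand_vars[i] + " = " + str(old_temp_val) + " + " + str(values[i]) + " = " + str(temp_val))
--         final_val = temp_val
--
--     return final_val, clauses, avail_vars
-- ===== SOURCE B (Python) =====
-- def GenSumText(sum_var, summand_vars, values, avail_vars):
--     l = len(summand_vars)
--     if l == 0:
--         return 0, [sum_var + " = 0"], avail_vars
--     if l == 1: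
--         return values[0], [sum_var + " = " + summand_vars[0] + " = " + str(values[0])], avail_vars
--     # prefix table of running mod-23 sums: prefix[i] = value shown after summand i
--     prefix = [values[0]]
--     for v in values[1:l]:
--         prefix.append((prefix[-1] + v) % 23)
--     # left-hand-side names: the popped tail of avail_vars (reversed), then sum_var last
--     k = l - 2
--     names = (avail_vars[-k:][::-1] if k > 0 else []) + [sum_var]
--     del avail_vars[len(avail_vars) - k:]
--     clauses = [names[0] + " = " + summand_vars[0] + " + " + summand_vars[1] + " = "
--                + str(values[0]) + " + " + str(values[1]) + " = " + str(prefix[1])]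
--     for i in range(2, l):
--         clauses.append(names[i - 1] + " = " + names[i - 2] + " + " + summand_vars[i] + " = "
--                        + str(prefix[i - 1]) + " + " + str(values[i]) + " = " + str(prefix[i]))
--     return prefix[l - 1], clauses, avail_vars
-- ===== Notes on version B (the rewrite author's own statement) =====
-- stated objective: alternative
-- what changed: B replaces A's single stateful loop (temp_var/temp_val threaded through successive avail_vars.pop() calls) by independent passes: a prefix table of the running mod-23 sums, the whole clause-name list obtained by slicing the popped tail off avail_vars in one step, and a final pass that zips names and prefix values into the clauses.
import Mathlib
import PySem

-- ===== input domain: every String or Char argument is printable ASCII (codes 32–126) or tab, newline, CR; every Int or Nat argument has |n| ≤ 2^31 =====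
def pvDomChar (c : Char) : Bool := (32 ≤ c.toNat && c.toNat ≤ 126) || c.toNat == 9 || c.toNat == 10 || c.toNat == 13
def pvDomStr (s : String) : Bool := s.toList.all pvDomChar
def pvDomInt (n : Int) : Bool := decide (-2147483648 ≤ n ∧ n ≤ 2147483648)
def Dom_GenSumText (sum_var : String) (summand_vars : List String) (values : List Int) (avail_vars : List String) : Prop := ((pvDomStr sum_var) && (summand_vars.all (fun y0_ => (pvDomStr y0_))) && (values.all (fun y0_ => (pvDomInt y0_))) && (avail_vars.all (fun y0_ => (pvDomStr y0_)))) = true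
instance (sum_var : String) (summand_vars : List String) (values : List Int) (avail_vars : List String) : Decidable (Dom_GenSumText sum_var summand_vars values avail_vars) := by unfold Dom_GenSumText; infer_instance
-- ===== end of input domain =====

-- B replaces A's single stateful loop (temp_var/temp_val threaded through pops) by independent passes:
-- a prefix table of running mod-23 sums, the clause-name list sliced off avail_vars in one step, and a
-- final pass zipping them into clauses (objective: alternative). Both A and B mutate avail_vars in place
-- (A pops, B deletes the same tail); the equivalence proved covers the returned avail_vars list.

-- ===== PORT A =====
-- avail_vars.pop(): pop? returns none on [] (IndexError) — that input is excluded by Pre_GenSumText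
def pvPop (xs : List String) : String × List String :=
  match PySem.List.pop? xs with
  | some r => r
  | none => ("", xs)

def pvStepA (sum_var : String) (summand_vars : List String) (values : List Int) (l : Nat)
    (s : String × Int × List String × List String) (i : Int) : String × Int × List String × List String :=
  let old_temp_var := s.1
  let old_temp_val := s.2.1
  let pr := if i < (l : Int) - 1 then pvPop s.2.2.2 else (sum_var, s.2.2.2)
  let vi := PySem.List.pyGetD values i 0
  let temp_val := PySem.Int.mod (old_temp_val + vi) 23
  (pr.1, temp_val,
   s.2.2.1 ++ [pr.1 ++ " = " ++ old_temp_var ++ " + " ++ PySem.List.pyGetD summand_vars i "" ++ " = "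
     ++ PySem.Int.toStr old_temp_val ++ " + " ++ PySem.Int.toStr vi ++ " = " ++ PySem.Int.toStr temp_val],
   pr.2)

def GenSumText (sum_var : String) (summand_vars : List String) (values : List Int) (avail_vars : List String) : Int × List String × List String :=
  let l : Nat := summand_vars.length
  if l = 0 then
    (0, [sum_var ++ " = 0"], avail_vars)
  else if l = 1 then
    -- values[0]: in range under Pre_GenSumText, pyGetD totalizes
    let fv := PySem.List.pyGetD values 0 0
    (fv, [sum_var ++ " = " ++ PySem.List.pyGetD summand_vars 0 "" ++ " = " ++ PySem.Int.toStr fv], avail_vars)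
  else
    let v0 := PySem.List.pyGetD values 0 0
    let v1 := PySem.List.pyGetD values 1 0
    let pr0 := if 2 < l then pvPop avail_vars else (sum_var, avail_vars)
    let temp_val := PySem.Int.mod (v0 + v1) 23
    let cls0 := [pr0.1 ++ " = " ++ PySem.List.pyGetD summand_vars 0 "" ++ " + " ++ PySem.List.pyGetD summand_vars 1 "" ++ " = "
      ++ PySem.Int.toStr v0 ++ " + " ++ PySem.Int.toStr v1 ++ " = " ++ PySem.Int.toStr temp_val]
    let st := (PySem.List.pyRange 2 (l : Int)).foldl (pvStepA sum_var summand_vars values l) (pr0.1, temp_val, cls0, pr0.2)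
    (st.2.1, st.2.2.1, st.2.2.2)

-- ===== PORT B =====
-- prefix = [values[0]]; for v in values[1:l]: prefix.append((prefix[-1] + v) % 23)
def pvPrefix (a : Int) : List Int → List Int
  | [] => [a]
  | v :: vs => a :: pvPrefix (PySem.Int.mod (a + v) 23) vs

def pvClauseB (summand_vars : List String) (values : List Int) (names : List String) (pfx : List Int) (i : Int) : String :=
  PySem.List.pyGetD names (i - 1) "" ++ " = " ++ PySem.List.pyGetD names (i - 2) "" ++ " + "
    ++ PySem.List.pyGetD summand_vars i "" ++ " = " ++ PySem.Int.toStr (PySem.List.pyGetD pfx (i - 1) 0)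
    ++ " + " ++ PySem.Int.toStr (PySem.List.pyGetD values i 0) ++ " = " ++ PySem.Int.toStr (PySem.List.pyGetD pfx i 0)

def GenSumText_alt (sum_var : String) (summand_vars : List String) (values : List Int) (avail_vars : List String) : Int × List String × List String :=
  let l : Nat := summand_vars.length
  if l = 0 then
    (0, [sum_var ++ " = 0"], avail_vars)
  else if l = 1 then
    let v0 := PySem.List.pyGetD values 0 0
    (v0, [sum_var ++ " = " ++ PySem.List.pyGetD summand_vars 0 "" ++ " = " ++ PySem.Int.toStr v0], avail_vars)
  else
    let pfx := pvPrefix (PySem.List.pyGetD values 0 0) (PySem.List.slice values (some 1) (some (l : Int)))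
    let k : Nat := l - 2
    -- names = (avail_vars[-k:][::-1] if k > 0 else []) + [sum_var]
    let names := (if 0 < k then (PySem.List.slice avail_vars (some (-(k : Int))) none).reverse else []) ++ [sum_var]
    -- del avail_vars[len(avail_vars) - k:]  (keeps avail_vars[:len-k])
    let avail' := PySem.List.slice avail_vars none (some ((avail_vars.length : Int) - (k : Int)))
    let cls0 := [PySem.List.pyGetD names 0 "" ++ " = " ++ PySem.List.pyGetD summand_vars 0 "" ++ " + "
      ++ PySem.List.pyGetD summand_vars 1 "" ++ " = " ++ PySem.Int.toStr (PySem.List.pyGetD values 0 0)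
      ++ " + " ++ PySem.Int.toStr (PySem.List.pyGetD values 1 0) ++ " = " ++ PySem.Int.toStr (PySem.List.pyGetD pfx 1 0)]
    let clauses := (PySem.List.pyRange 2 (l : Int)).foldl
      (fun acc i => acc ++ [pvClauseB summand_vars values names pfx i]) cls0
    (PySem.List.pyGetD pfx ((l : Int) - 1) 0, clauses, avail')

-- ===== PRECONDITION & SPEC =====
-- Pre_ excludes exactly the inputs where A raises IndexError: values shorter than summand_vars
-- (values[i] out of range) or fewer than len(summand_vars)-2 avail_vars (pop from empty list).
def Pre_GenSumText (sum_var : String) (summand_vars : List String) (values : List Int) (avail_vars : List String) : Prop :=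
  summand_vars.length ≤ values.length ∧ summand_vars.length - 2 ≤ avail_vars.length

instance (sum_var : String) (summand_vars : List String) (values : List Int) (avail_vars : List String) : Decidable (Pre_GenSumText sum_var summand_vars values avail_vars) := by unfold Pre_GenSumText; infer_instance

def pvWitness_GenSumText : String × List String × List Int × List String :=
  ("s", ["x", "y", "z"], [3, 25, -4], ["t1", "t2"])

def Spec_GenSumText (sum_var : String) (summand_vars : List String) (values : List Int) (avail_vars : List String) (out : Int × List String × List String) : Prop := out = GenSumText_alt sum_var summand_vars values avail_vars
instance (sum_var : String) (summand_vars : List String) (values : List Int) (avail_vars : List String) (out : Int × List String × List String) : Decidable (Spec_GenSumText sum_var summand_vars values avail_vars out) := by unfold Spec_GenSumText; infer_instance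

-- ===== CLAIM (what is proved, stated in full; the proofs are below) =====
def Claim_equal_GenSumText : Prop := ∀ (sum_var : String) (summand_vars : List String) (values : List Int) (avail_vars : List String), Dom_GenSumText sum_var summand_vars values avail_vars → Pre_GenSumText sum_var summand_vars values avail_vars → Spec_GenSumText sum_var summand_vars values avail_vars (GenSumText sum_var summand_vars values avail_vars)

-- ===== LEMMAS AND PROOFS =====

theorem pvPrefix_getD_zero (vs : List Int) (a : Int) : (pvPrefix a vs).getD 0 0 = a := by
  cases vs <;> simp [pvPrefix]

theorem pvPrefix_getD_succ (vs : List Int) (a : Int) (j : Nat) (hj : j < vs.length) :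
    (pvPrefix a vs).getD (j + 1) 0 = PySem.Int.mod ((pvPrefix a vs).getD j 0 + vs.getD j 0) 23 := by
  induction vs generalizing a j with
  | nil => simp at hj
  | cons v vs ih =>
    cases j with
    | zero =>
      simp only [pvPrefix, List.getD_cons_succ, List.getD_cons_zero]
      simpa [List.getD] using pvPrefix_getD_zero vs (PySem.Int.mod (a + v) 23)
    | succ j => simpa [pvPrefix] using ih (PySem.Int.mod (a + v) 23) j (by simpa using hj)


theorem pvSliceNegFrom (xs : List String) (k : Nat) (h0 : 0 < k) (hk : k ≤ xs.length) :
    PySem.List.slice xs (some (-(k : Int))) none = xs.drop (xs.length - k) := by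
  have h1 : ¬ ((xs.length : Int) + -(k : Int) < 0) := by omega
  have h2 : (-(k : Int) < 0) := by omega
  simp only [PySem.List.slice, PySem.List.clampIdx, if_pos h2, if_neg h1]
  have h3 : ((xs.length : Int) + -(k : Int)).toNat = xs.length - k := by omega
  rw [h3, List.take_of_length_le (by simp)]

theorem pvSliceToSub (xs : List String) (k : Nat) (hk : k ≤ xs.length) :
    PySem.List.slice xs none (some ((xs.length : Int) - (k : Int))) = xs.take (xs.length - k) := by
  have h : ((xs.length : Int) - (k : Int)) = ((xs.length - k : Nat) : Int) := by omega
  rw [h, PySem.List.slice_to_natCast]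

theorem pvPop_take (avail : List String) (m : Nat) (h0 : 0 < m) (hm : m ≤ avail.length) :
    pvPop (avail.take m) = (avail.getD (m - 1) "", avail.take (m - 1)) := by
  have hlt : m - 1 < avail.length := by omega
  have h := List.take_succ (l := avail) (i := m - 1)
  rw [List.getElem?_eq_getElem hlt] at h
  have hm1 : m - 1 + 1 = m := by omega
  rw [hm1] at h
  rw [h]
  simp only [Option.toList_some, pvPop, PySem.List.pop?_last]
  rw [List.getD_eq_getElem _ _ hlt]

theorem pvNamesGetDLt (avail : List String) (sum_var : String) (k m : Nat)
    (hk : k ≤ avail.length) (hm : m < k) :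
    ((if 0 < k then (PySem.List.slice avail (some (-(k : Int))) none).reverse else []) ++ [sum_var]).getD m ""
      = avail.getD (avail.length - 1 - m) "" := by
  rw [if_pos (by omega), pvSliceNegFrom avail k (by omega) hk]
  have hrl : (avail.drop (avail.length - k)).reverse.length = k := by simp; omega
  have hmr : m < (avail.drop (avail.length - k)).reverse.length := by omega
  rw [List.getD_append _ _ _ _ hmr, List.getD_eq_getElem _ _ hmr,
      List.getElem_reverse, List.getElem_drop]
  rw [List.getD_eq_getElem _ _ (by omega : avail.length - 1 - m < avail.length)]
  congr 1
  simp at hmr ⊢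
  omega

theorem pvNamesGetDK (avail : List String) (sum_var : String) (k : Nat) (hk : k ≤ avail.length) :
    ((if 0 < k then (PySem.List.slice avail (some (-(k : Int))) none).reverse else []) ++ [sum_var]).getD k ""
      = sum_var := by
  by_cases h : 0 < k
  · rw [if_pos h, pvSliceNegFrom avail k h hk]
    have hrl : (avail.drop (avail.length - k)).reverse.length = k := by simp; omega
    rw [List.getD_append_right _ _ _ _ (by omega), hrl]
    simp
  · have : k = 0 := by omega
    subst this
    simp

theorem pvPyRangeSelf (a : Int) : PySem.List.pyRange a a = [] := by
  simp [PySem.List.pyRange]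

theorem pvLoopAInv
    (sum_var : String) (summand_vars : List String) (values : List Int) (avail : List String)
    (names : List String) (pfx : List Int) (l k : Nat)
    (hl : 2 ≤ l) (hk : k = l - 2) (hka : k ≤ avail.length)
    (hnames_lt : ∀ m, m < k → names.getD m "" = avail.getD (avail.length - 1 - m) "")
    (hnames_k : names.getD k "" = sum_var)
    (hpfx : ∀ j : Nat, 1 ≤ j → j < l →
      pfx.getD j 0 = PySem.Int.mod (pfx.getD (j - 1) 0 + PySem.List.pyGetD values (j : Int) 0) 23) :
    ∀ (d j : Nat), l - j = d → 2 ≤ j → j ≤ l → ∀ C : List String,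
      (PySem.List.pyRange (j : Int) (l : Int)).foldl (pvStepA sum_var summand_vars values l)
        (names.getD (j - 2) "", pfx.getD (j - 1) 0, C, avail.take (avail.length - min (j - 1) k)) =
      (names.getD (l - 2) "", pfx.getD (l - 1) 0,
        C ++ (PySem.List.pyRange (j : Int) (l : Int)).map (pvClauseB summand_vars values names pfx),
        avail.take (avail.length - k)) := by
  intro d
  induction d with
  | zero =>
    intro j hd h2 hjl C
    have hj : j = l := by omega
    subst hj
    have hmin : min (j - 1) k = k := by omega
    rw [pvPyRangeSelf]
    simp [hmin]
  | succ d ih =>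
    intro j hd h2 hjl C
    have hjl' : j < l := by omega
    rw [PySem.List.pyRange_one_cons (by exact_mod_cast hjl' : (j : Int) < (l : Int))]
    simp only [List.foldl_cons, List.map_cons]
    have htval : PySem.Int.mod (pfx.getD (j - 1) 0 + values.getD j 0) 23 = pfx.getD j 0 := by
      have h := (hpfx j (by omega) hjl').symm
      rwa [PySem.List.pyGetD_natCast] at h
    have hclause :
        pvStepA sum_var summand_vars values l
          (names.getD (j - 2) "", pfx.getD (j - 1) 0, C, avail.take (avail.length - min (j - 1) k)) (j : Int)
        = (names.getD (j - 1) "", pfx.getD j 0,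
            C ++ [pvClauseB summand_vars values names pfx (j : Int)],
            avail.take (avail.length - min j k)) := by
      have hcast1 : ((j : Int) - 1) = ((j - 1 : Nat) : Int) := by omega
      have hcast2 : ((j : Int) - 2) = ((j - 2 : Nat) : Int) := by omega
      by_cases hlt : j < l - 1
      · have hki : 1 ≤ k := by omega
        have hmin1 : min (j - 1) k = j - 1 := by omega
        have hpop : pvPop (avail.take (avail.length - (j - 1)))
            = (avail.getD (avail.length - j) "", avail.take (avail.length - j)) := by
          have h := pvPop_take avail (avail.length - (j - 1)) (by omega) (by omega)
          have he : avail.length - (j - 1) - 1 = avail.length - j := by omega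
          rw [he] at h
          exact h
        have hname : names.getD (j - 1) "" = avail.getD (avail.length - j) "" := by
          rw [hnames_lt (j - 1) (by omega)]
          congr 1
          omega
        have hmin2 : min j k = j := by omega
        have hcond : ((j : Int) < (l : Int) - 1) := by omega
        simp only [pvStepA, if_pos hcond, hmin1, hpop, hmin2]
        simp only [pvClauseB, hcast1, hcast2, PySem.List.pyGetD_natCast, hname]
        rw [htval]
      · have hmin1 : min (j - 1) k = k := by omega
        have hmin2 : min j k = k := by omega
        have hname : names.getD (j - 1) "" = sum_var := by
          have he : j - 1 = k := by omega
          rw [he, hnames_k]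
        have hcond : ¬ ((j : Int) < (l : Int) - 1) := by omega
        simp only [pvStepA, if_neg hcond, hmin1, hmin2]
        simp only [pvClauseB, hcast1, hcast2, PySem.List.pyGetD_natCast, hname]
        rw [htval]
    rw [hclause]
    have hcast3 : ((j : Int) + 1) = ((j + 1 : Nat) : Int) := by omega
    rw [hcast3]
    have h := ih (j + 1) (by omega) (by omega) (by omega)
      (C ++ [pvClauseB summand_vars values names pfx (j : Int)])
    have he1 : j + 1 - 2 = j - 1 := by omega
    have he2 : j + 1 - 1 = j := by omega
    rw [he1, he2] at h
    rw [h]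
    simp

-- ===== VERDICT (by name: the statement is the Claim_ definition above) =====
theorem GenSumText_spec : Claim_equal_GenSumText := by
  intro sum_var summand_vars values avail _hdom hpre
  obtain ⟨hpre1, hpre2⟩ := hpre
  unfold Spec_GenSumText
  by_cases h0 : summand_vars.length = 0
  · simp [GenSumText, GenSumText_alt, h0]
  by_cases h1 : summand_vars.length = 1
  · simp [GenSumText, GenSumText_alt, h0, h1]
  have hl : 2 ≤ summand_vars.length := by omega
  rw [GenSumText, GenSumText_alt]
  simp only [if_neg h0, if_neg h1]
  set names := (if 0 < summand_vars.length - 2 then (PySem.List.slice avail (some (-((summand_vars.length - 2 : Nat) : Int))) none).reverse else []) ++ [sum_var] with hnamesdef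
  set vs := PySem.List.slice values (some 1) (some (summand_vars.length : Int)) with hvsdef
  set pfx := pvPrefix (PySem.List.pyGetD values 0 0) vs with hpfxdef
  -- facts about vs / pfx
  have hvs : vs = (values.drop 1).take (summand_vars.length - 1) := by
    rw [hvsdef]
    have h : (1 : Int) = ((1 : Nat) : Int) := by norm_num
    rw [h, PySem.List.slice_natCast]
  have hvslen : vs.length = summand_vars.length - 1 := by
    rw [hvs]; simp; omega
  have hvsget : ∀ j : Nat, 1 ≤ j → j < summand_vars.length → vs.getD (j - 1) 0 = values.getD j 0 := by
    intro j hj1 hjl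
    rw [hvs]
    have hb1 : j - 1 < ((values.drop 1).take (summand_vars.length - 1)).length := by
      simp; omega
    have hb2 : j < values.length := by omega
    rw [List.getD_eq_getElem _ _ hb1, List.getD_eq_getElem _ _ hb2]
    rw [List.getElem_take, List.getElem_drop]
    congr 1
    omega
  have hpfx0 : pfx.getD 0 0 = PySem.List.pyGetD values 0 0 := pvPrefix_getD_zero vs _
  have hpfx : ∀ j : Nat, 1 ≤ j → j < summand_vars.length →
      pfx.getD j 0 = PySem.Int.mod (pfx.getD (j - 1) 0 + PySem.List.pyGetD values (j : Int) 0) 23 := by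
    intro j hj1 hjl
    have hb : j - 1 < vs.length := by omega
    have h := pvPrefix_getD_succ vs (PySem.List.pyGetD values 0 0) (j - 1) hb
    have he : j - 1 + 1 = j := by omega
    rw [he] at h
    rw [hpfxdef, h, hvsget j hj1 hjl, PySem.List.pyGetD_natCast]
  -- names facts
  have hnames_lt : ∀ m, m < summand_vars.length - 2 →
      names.getD m "" = avail.getD (avail.length - 1 - m) "" :=
    fun m hm => pvNamesGetDLt avail sum_var (summand_vars.length - 2) m (by omega) hm
  have hnames_k : names.getD (summand_vars.length - 2) "" = sum_var :=
    pvNamesGetDK avail sum_var (summand_vars.length - 2) (by omega)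
  -- initial pop of A
  have hpr0 : (if 2 < summand_vars.length then pvPop avail else (sum_var, avail))
      = (names.getD 0 "", avail.take (avail.length - min 1 (summand_vars.length - 2))) := by
    by_cases h2l : 2 < summand_vars.length
    · have hmin : min 1 (summand_vars.length - 2) = 1 := by omega
      rw [if_pos h2l, hmin]
      have htk : pvPop avail = pvPop (avail.take avail.length) := by rw [List.take_length]
      rw [htk, pvPop_take avail avail.length (by omega) (by omega)]
      rw [hnames_lt 0 (by omega)]
      norm_num
    · have hmin : min 1 (summand_vars.length - 2) = 0 := by omega
      rw [if_neg h2l, hmin]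
      have hk0 : summand_vars.length - 2 = 0 := by omega
      rw [hk0] at hnames_k
      rw [hnames_k]
      simp
  -- initial temp_val of A equals pfx[1]
  have htv0 : PySem.Int.mod (PySem.List.pyGetD values 0 0 + PySem.List.pyGetD values 1 0) 23
      = pfx.getD 1 0 := by
    have h := hpfx 1 (by omega) (by omega)
    rw [h, hpfx0]
    norm_num
  have hg1 : PySem.List.pyGetD pfx 1 0 = pfx.getD 1 0 := by
    have h : (1 : Int) = ((1 : Nat) : Int) := by norm_num
    rw [h, PySem.List.pyGetD_natCast]
  have hg0 : PySem.List.pyGetD names 0 "" = names.getD 0 "" := PySem.List.pyGetD_zero names ""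
  have hgl : PySem.List.pyGetD pfx ((summand_vars.length : Int) - 1) 0
      = pfx.getD (summand_vars.length - 1) 0 := by
    have h : ((summand_vars.length : Int) - 1) = ((summand_vars.length - 1 : Nat) : Int) := by omega
    rw [h, PySem.List.pyGetD_natCast]
  have havail' : PySem.List.slice avail none (some ((avail.length : Int) - ((summand_vars.length - 2 : Nat) : Int)))
      = avail.take (avail.length - (summand_vars.length - 2)) :=
    pvSliceToSub avail (summand_vars.length - 2) (by omega)
  have hrange2 : ((2 : Int)) = (((2 : Nat)) : Int) := by norm_num
  have hinv := pvLoopAInv sum_var summand_vars values avail names pfx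
      summand_vars.length (summand_vars.length - 2) hl rfl (by omega)
      hnames_lt hnames_k hpfx (summand_vars.length - 2) 2 (by omega) (by omega) (by omega)
  have he22 : (2 : Nat) - 2 = 0 := by norm_num
  have he21 : (2 : Nat) - 1 = 1 := by norm_num
  rw [he22, he21] at hinv
  rw [hpr0, htv0]
  rw [PySem.List.foldl_append_singleton_eq_map (pvClauseB summand_vars values names pfx)]
  rw [hrange2, hinv]
  rw [hg1, hg0, hgl, havail']
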